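-- pv_equiv track=rewrite | github.com/mindu2kk/CodePTIT-Python | bai234pheptoancoban.py | restore_expression
-- ===== SOURCE A (Python) =====
-- import itertools
--
-- operators = ['+', '-', '*', '/']
--
-- def evaluate_expression(a, op, b, c):
--     """ Kiểm tra biểu thức có đúng không """
--     if op == '+':
--         return a + b == c
--     elif op == '-':
--         return a - b == c
--     elif op == '*':
--         return a * b == c
--     elif op == '/':
--         return b != 0 and a % b == 0 and a // b == c
--     return False
--
-- def restore_expression(expression):
--     """ Khôi phục biểu thức có chứa dấu '?' """
--     parts = expression.split()
--     possible_expressions = []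
--
--     # Duyệt qua mọi giá trị của A, B, C từ 10 đến 99
--     for a, b, c in itertools.product(range(10, 100), repeat=3):
--         for op in operators:
--             # Tạo biểu thức thay thế `?`
--             candidate = f"{a} {op} {b} = {c}"
--
--             # Kiểm tra xem `candidate` có khớp với `expression`
--             if len(expression) == len(candidate):
--                 match = True
--                 for i in range(len(expression)):
--                     if expression[i] != '?' and expression[i] != candidate[i]:
--                         match = False
--                         break
--                 if match and evaluate_expression(a, op, b, c):
--                     possible_expressions.append(candidate)
--
--     # Nếu có đúng một biểu thức hợp lệ, trả về kết quả
--     if len(possible_expressions) == 1: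
--         return possible_expressions[0]
--     else:
--         return "WRONG PROBLEM!"
-- ===== SOURCE B (Python) =====
-- def restore_expression(expression):
--     """Pattern-directed search: validate the fixed two-digit-equation layout once,
--     restrict every digit position and the operator to the characters the pattern
--     allows, and derive C arithmetically instead of enumerating it."""
--     e = expression
--     if len(e) != 12:
--         return "WRONG PROBLEM!"
--     if not all(e[i] in ('?', ch) for i, ch in ((2, ' '), (4, ' '), (7, ' '), (8, '='), (9, ' '))):
--         return "WRONG PROBLEM!"
--     d0s = [d for d in range(1, 10) if e[0] in ('?', chr(48 + d))]
--     d1s = [d for d in range(0, 10) if e[1] in ('?', chr(48 + d))]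
--     d2s = [d for d in range(1, 10) if e[5] in ('?', chr(48 + d))]
--     d3s = [d for d in range(0, 10) if e[6] in ('?', chr(48 + d))]
--     ops = [op for op in ['+', '-', '*', '/'] if e[3] in ('?', op)]
--
--     def results(a, op, b):
--         if op == '+':
--             c = a + b
--         elif op == '-':
--             c = a - b
--         elif op == '*':
--             c = a * b
--         else:
--             if a % b != 0:
--                 return []
--             c = a // b
--         if 10 <= c <= 99 and e[10] in ('?', chr(48 + c // 10)) and e[11] in ('?', chr(48 + c % 10)):
--             return [f"{a} {op} {b} = {c}"]
--         return []
--
--     found = [s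
--              for d0 in d0s for d1 in d1s
--              for d2 in d2s for d3 in d3s
--              for op in ops
--              for s in results(10 * d0 + d1, op, 10 * d2 + d3)]
--     return found[0] if len(found) == 1 else "WRONG PROBLEM!"
-- ===== Notes on version B (the rewrite author's own statement) =====
-- stated objective: faster
-- what changed: Instead of enumerating all 90*90*90*4 combinations of A, B, C and the operator and string-matching each candidate, B validates the fixed two-digit-equation layout once, restricts every digit position and the operator to the characters the pattern allows, and derives C arithmetically, checking C only against the last two pattern characters.
import Mathlib
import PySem

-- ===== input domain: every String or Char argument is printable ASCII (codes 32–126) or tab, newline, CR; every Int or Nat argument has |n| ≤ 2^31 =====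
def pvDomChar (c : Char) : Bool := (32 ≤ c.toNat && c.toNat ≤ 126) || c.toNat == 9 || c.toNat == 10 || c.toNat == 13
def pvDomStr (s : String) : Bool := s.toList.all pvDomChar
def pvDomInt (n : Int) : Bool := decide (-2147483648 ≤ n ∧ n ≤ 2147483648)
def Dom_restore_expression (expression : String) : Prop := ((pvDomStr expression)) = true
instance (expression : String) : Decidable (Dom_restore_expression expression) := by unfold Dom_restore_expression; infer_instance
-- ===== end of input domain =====

-- B replaces A's brute force over all (A, B, C, op) candidate strings by a pattern-directed
-- search: it validates the fixed two-digit-equation layout once, restricts each digit position and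
-- the operator to the characters the pattern allows, and derives C arithmetically (objective: faster).

-- ===== PORT A =====
def operators : List String := ["+", "-", "*", "/"]

def evaluate_expression (a : Int) (op : String) (b : Int) (c : Int) : Bool :=
  if op = "+" then a + b == c
  else if op = "-" then a - b == c
  else if op = "*" then a * b == c
  else if op = "/" then b != 0 && PySem.Int.mod a b == 0 && PySem.Int.floordiv a b == c
  else false

-- f"{a} {op} {b} = {c}" as a list of characters (strings are handled on the List Char side)
def pvCandChars (a : Int) (op : String) (b : Int) (c : Int) : List Char :=
  PySem.Int.toChars a ++ [' '] ++ op.toList ++ [' '] ++ PySem.Int.toChars b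
    ++ [' ', '=', ' '] ++ PySem.Int.toChars c

-- 'len(expression) == len(candidate)' and then the char-by-char loop accepting '?'
-- (the loop with its break is the conjunction over aligned characters)
def pvMatchChars : List Char → List Char → Bool
  | e :: es, c :: cs => (e == '?' || e == c) && pvMatchChars es cs
  | _, _ => true

def pvMatch (expression : String) (candidate : List Char) : Bool :=
  expression.toList.length == candidate.length && pvMatchChars expression.toList candidate

-- A: 'parts = expression.split()' is dead code in the Python and is omitted.
-- itertools.product(range(10,100), repeat=3) = three nested loops over range(10, 100).
def restore_expression (expression : String) : String :=
  let possible : List (List Char) :=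
    (PySem.List.pyRange 10 100 1).foldl (fun acc a =>
      (PySem.List.pyRange 10 100 1).foldl (fun acc b =>
        (PySem.List.pyRange 10 100 1).foldl (fun acc c =>
          operators.foldl (fun acc op =>
            if pvMatch expression (pvCandChars a op b c) && evaluate_expression a op b c
            then acc ++ [pvCandChars a op b c] else acc) acc) acc) acc) []
  if possible.length == 1 then String.ofList (possible.headD []) else "WRONG PROBLEM!"

-- ===== PORT B =====
-- e[i] in ('?', ch)
def pvChk (ech target : Char) : Bool := ech == '?' || ech == target

-- chr(48 + d) for a digit d
def pvDigC (d : Int) : Char := Char.ofNat (48 + d.toNat)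

-- f"{a} {op} {b} = {c}" with a one-character operator
def pvCandB (a : Int) (op : Char) (b : Int) (c : Int) : List Char :=
  PySem.Int.toChars a ++ ' ' :: op :: ' ' ::
    (PySem.Int.toChars b ++ ' ' :: '=' :: ' ' :: PySem.Int.toChars c)

-- the tail of results(): range- and pattern-check the derived c
def pvResC (el : List Char) (a : Int) (op : Char) (b : Int) (c : Int) : List (List Char) :=
  if (10 ≤ c ∧ c ≤ 99) ∧ pvChk (el.getD 10 ' ') (pvDigC (PySem.Int.floordiv c 10)) = true
      ∧ pvChk (el.getD 11 ' ') (pvDigC (PySem.Int.mod c 10)) = true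
  then [pvCandB a op b c] else []

-- results(a, op, b): derive c from the operator, then check it
def pvResults (el : List Char) (a : Int) (op : Char) (b : Int) : List (List Char) :=
  if op = '+' then pvResC el a op b (a + b)
  else if op = '-' then pvResC el a op b (a - b)
  else if op = '*' then pvResC el a op b (a * b)
  else if PySem.Int.mod a b ≠ 0 then []
  else pvResC el a op b (PySem.Int.floordiv a b)

def restore_expression_alt (expression : String) : String :=
  let el := expression.toList
  if el.length ≠ 12 then "WRONG PROBLEM!"
  else if ¬ (([(2, ' '), (4, ' '), (7, ' '), (8, '='), (9, ' ')] : List (Nat × Char)).all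
                fun p => pvChk (el.getD p.1 ' ') p.2) = true then "WRONG PROBLEM!"
  else
    let d0s := (PySem.List.pyRange 1 10 1).filter fun d => pvChk (el.getD 0 ' ') (pvDigC d)
    let d1s := (PySem.List.pyRange 0 10 1).filter fun d => pvChk (el.getD 1 ' ') (pvDigC d)
    let d2s := (PySem.List.pyRange 1 10 1).filter fun d => pvChk (el.getD 5 ' ') (pvDigC d)
    let d3s := (PySem.List.pyRange 0 10 1).filter fun d => pvChk (el.getD 6 ' ') (pvDigC d)
    let ops := (['+', '-', '*', '/'] : List Char).filter fun op => pvChk (el.getD 3 ' ') op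
    let found := d0s.flatMap fun d0 => d1s.flatMap fun d1 =>
      d2s.flatMap fun d2 => d3s.flatMap fun d3 =>
        ops.flatMap fun op => pvResults el (10 * d0 + d1) op (10 * d2 + d3)
    if found.length == 1 then String.ofList (found.headD []) else "WRONG PROBLEM!"

-- ===== PRECONDITION & SPEC =====
def Spec_restore_expression (expression : String) (out : String) : Prop := out = restore_expression_alt expression
instance (expression : String) (out : String) : Decidable (Spec_restore_expression expression out) := by unfold Spec_restore_expression; infer_instance

-- ===== CLAIM (what is proved, stated in full; the proofs are below) =====
def Claim_equal_restore_expression : Prop := ∀ (expression : String), Dom_restore_expression expression → Spec_restore_expression expression (restore_expression expression)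

-- ===== LEMMAS AND PROOFS =====

-- the body of A's innermost loop, as a per-iteration list
def pvGop (e : String) (a b c : Int) (op : String) : List (List Char) :=
  if pvMatch e (pvCandChars a op b c) && evaluate_expression a op b c
  then [pvCandChars a op b c] else []

-- A's quadruple loop, flattened
def pvAList (e : String) : List (List Char) :=
  (PySem.List.pyRange 10 100 1).flatMap fun a =>
    (PySem.List.pyRange 10 100 1).flatMap fun b =>
      (PySem.List.pyRange 10 100 1).flatMap fun c =>
        operators.flatMap (pvGop e a b c)

-- intermediate form: c derived from (a, op, b), pattern still checked by pvMatch
def pvDerC (a : Int) (op : String) (b : Int) : Option Int :=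
  if op = "+" then some (a + b)
  else if op = "-" then some (a - b)
  else if op = "*" then some (a * b)
  else if PySem.Int.mod a b = 0 then some (PySem.Int.floordiv a b) else none

def pvM1 (e : String) (a b : Int) (op : String) : List (List Char) :=
  match pvDerC a op b with
  | none => []
  | some c =>
    if 10 ≤ c ∧ c ≤ 99 then
      (if pvMatch e (pvCandChars a op b c) then [pvCandChars a op b c] else [])
    else []

def pvMList (e : String) : List (List Char) :=
  (PySem.List.pyRange 10 100 1).flatMap fun a =>
    (PySem.List.pyRange 10 100 1).flatMap fun b =>
      operators.flatMap (pvM1 e a b)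

-- a foldl whose step only EXTENSIONALLY appends g x (PySem.List.foldl_append_eq_flatMap
-- needs the step to be a syntactic append, which the nested loop bodies here are not)
theorem pv_foldl_ext_flatMap {α β : Type} (g : α → List β) (step : List β → α → List β)
    (h : ∀ acc x, step acc x = acc ++ g x) :
    ∀ (l : List α) (init : List β), l.foldl step init = init ++ l.flatMap g := by
  intro l
  induction l with
  | nil => intro init; simp
  | cons x xs ih =>
    intro init
    rw [List.foldl_cons, ih, h, List.flatMap_cons, List.append_assoc]

theorem pvA_fold_eq (e : String) :
    ((PySem.List.pyRange 10 100 1).foldl (fun acc a =>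
      (PySem.List.pyRange 10 100 1).foldl (fun acc b =>
        (PySem.List.pyRange 10 100 1).foldl (fun acc c =>
          operators.foldl (fun acc op =>
            if pvMatch e (pvCandChars a op b c) && evaluate_expression a op b c
            then acc ++ [pvCandChars a op b c] else acc) acc) acc) acc) []) = pvAList e := by
  have h3 : ∀ (a b c : Int) (acc : List (List Char)),
      (operators.foldl (fun acc op =>
        if pvMatch e (pvCandChars a op b c) && evaluate_expression a op b c
        then acc ++ [pvCandChars a op b c] else acc) acc)
        = acc ++ operators.flatMap (pvGop e a b c) :=
    fun a b c acc => pv_foldl_ext_flatMap (pvGop e a b c) _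
      (fun acc op => by unfold pvGop; split_ifs <;> simp) _ acc
  have h2 : ∀ (a b : Int) (acc : List (List Char)),
      ((PySem.List.pyRange 10 100 1).foldl (fun acc c =>
        operators.foldl (fun acc op =>
          if pvMatch e (pvCandChars a op b c) && evaluate_expression a op b c
          then acc ++ [pvCandChars a op b c] else acc) acc) acc)
        = acc ++ (PySem.List.pyRange 10 100 1).flatMap
            (fun c => operators.flatMap (pvGop e a b c)) :=
    fun a b acc => pv_foldl_ext_flatMap _ _ (fun acc c => h3 a b c acc) _ acc
  have h1 : ∀ (a : Int) (acc : List (List Char)),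
      ((PySem.List.pyRange 10 100 1).foldl (fun acc b =>
        (PySem.List.pyRange 10 100 1).foldl (fun acc c =>
          operators.foldl (fun acc op =>
            if pvMatch e (pvCandChars a op b c) && evaluate_expression a op b c
            then acc ++ [pvCandChars a op b c] else acc) acc) acc) acc)
        = acc ++ (PySem.List.pyRange 10 100 1).flatMap
            (fun b => (PySem.List.pyRange 10 100 1).flatMap
              (fun c => operators.flatMap (pvGop e a b c))) :=
    fun a acc => pv_foldl_ext_flatMap _ _ (fun acc b => h2 a b acc) _ acc
  unfold pvAList
  exact (pv_foldl_ext_flatMap _ _ (fun acc a => h1 a acc) _ []).trans (List.nil_append _)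

-- at most one c satisfies the test, so the scan over a nodup list is a single if
theorem pv_flatMap_unique {γ : Type} (l : List Int) (hl : l.Nodup) (p : Int → Bool)
    (f : Int → γ) (k : Int) (hp : ∀ c, p c = true → c = k) :
    (l.flatMap fun c => if p c then [f c] else []) = if k ∈ l ∧ p k = true then [f k] else [] := by
  induction l with
  | nil => simp
  | cons x xs ih =>
    rw [List.flatMap_cons, ih (List.Nodup.of_cons hl)]
    by_cases hx : p x = true
    · have hxk : x = k := hp x hx
      subst hxk
      have hnx : x ∉ xs := (List.nodup_cons.mp hl).1
      simp [hx, hnx]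
    · have hkx : p k = true → ¬ (k = x) := fun hk he => hx (he ▸ hk)
      by_cases hk : p k = true
      · simp [hx, hk, List.mem_cons, hkx hk]
      · simp [hx, hk]

theorem pv_ops_flatMap {γ : Type} (g : String → List γ) :
    operators.flatMap g = g "+" ++ g "-" ++ g "*" ++ g "/" := by
  simp [operators]

theorem pv_bounds_iff (x : Int) : (10 ≤ x ∧ x < 100) ↔ (10 ≤ x ∧ x ≤ 99) := by omega

-- per (a, b, op): A's inner scan over c equals the derived-c step
theorem pv_plus_eq (e : String) (a b : Int) :
    ((PySem.List.pyRange 10 100 1).flatMap fun c => pvGop e a b c "+") = pvM1 e a b "+" := by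
  unfold pvGop
  rw [pv_flatMap_unique _ (PySem.List.nodup_pyRange_one 10 100)
      (fun c => pvMatch e (pvCandChars a "+" b c) && evaluate_expression a "+" b c)
      (fun c => pvCandChars a "+" b c) (a + b)
      (by intro c h; simp [evaluate_expression] at h; omega)]
  by_cases hr : (10 : Int) ≤ a + b ∧ a + b < 100
  · have hr' := (pv_bounds_iff _).mp hr
    simp [pvM1, pvDerC, PySem.List.mem_pyRange_one, evaluate_expression, hr, hr']
  · have hr' : ¬ ((10 : Int) ≤ a + b ∧ a + b ≤ 99) := fun h => hr ((pv_bounds_iff _).mpr h)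
    simp [pvM1, pvDerC, PySem.List.mem_pyRange_one, evaluate_expression, hr, hr']

theorem pv_minus_eq (e : String) (a b : Int) :
    ((PySem.List.pyRange 10 100 1).flatMap fun c => pvGop e a b c "-") = pvM1 e a b "-" := by
  unfold pvGop
  rw [pv_flatMap_unique _ (PySem.List.nodup_pyRange_one 10 100)
      (fun c => pvMatch e (pvCandChars a "-" b c) && evaluate_expression a "-" b c)
      (fun c => pvCandChars a "-" b c) (a - b)
      (by intro c h; simp [evaluate_expression] at h; omega)]
  by_cases hr : (10 : Int) ≤ a - b ∧ a - b < 100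
  · have hr' := (pv_bounds_iff _).mp hr
    simp [pvM1, pvDerC, PySem.List.mem_pyRange_one, evaluate_expression, hr, hr']
  · have hr' : ¬ ((10 : Int) ≤ a - b ∧ a - b ≤ 99) := fun h => hr ((pv_bounds_iff _).mpr h)
    simp [pvM1, pvDerC, PySem.List.mem_pyRange_one, evaluate_expression]
    rw [if_neg (fun h => hr h.1), if_neg (show ¬ ((10 : Int) ≤ a - b ∧ a ≤ 99 + b) by omega)]

theorem pv_mul_eq (e : String) (a b : Int) :
    ((PySem.List.pyRange 10 100 1).flatMap fun c => pvGop e a b c "*") = pvM1 e a b "*" := by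
  unfold pvGop
  rw [pv_flatMap_unique _ (PySem.List.nodup_pyRange_one 10 100)
      (fun c => pvMatch e (pvCandChars a "*" b c) && evaluate_expression a "*" b c)
      (fun c => pvCandChars a "*" b c) (a * b)
      (by intro c h; simp [evaluate_expression] at h; omega)]
  by_cases hr : (10 : Int) ≤ a * b ∧ a * b < 100
  · have hr' := (pv_bounds_iff _).mp hr
    simp [pvM1, pvDerC, PySem.List.mem_pyRange_one, evaluate_expression, hr, hr']
  · have hr' : ¬ ((10 : Int) ≤ a * b ∧ a * b ≤ 99) := fun h => hr ((pv_bounds_iff _).mpr h)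
    simp [pvM1, pvDerC, PySem.List.mem_pyRange_one, evaluate_expression, hr, hr']

theorem pv_div_eq (e : String) (a b : Int) (hb : (10 : Int) ≤ b) :
    ((PySem.List.pyRange 10 100 1).flatMap fun c => pvGop e a b c "/") = pvM1 e a b "/" := by
  have hb0 : b ≠ 0 := by omega
  unfold pvGop
  by_cases hmod : PySem.Int.mod a b = 0
  · rw [pv_flatMap_unique _ (PySem.List.nodup_pyRange_one 10 100)
        (fun c => pvMatch e (pvCandChars a "/" b c) && evaluate_expression a "/" b c)
        (fun c => pvCandChars a "/" b c) (PySem.Int.floordiv a b)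
        (by intro c h; simp [evaluate_expression, hb0, hmod] at h; omega)]
    by_cases hr : (10 : Int) ≤ PySem.Int.floordiv a b ∧ PySem.Int.floordiv a b < 100
    · have hr' := (pv_bounds_iff _).mp hr
      simp [pvM1, pvDerC, PySem.List.mem_pyRange_one, evaluate_expression, hb0, hmod, hr, hr']
    · have hr' : ¬ ((10 : Int) ≤ PySem.Int.floordiv a b ∧ PySem.Int.floordiv a b ≤ 99) :=
        fun h => hr ((pv_bounds_iff _).mpr h)
      simp [pvM1, pvDerC, PySem.List.mem_pyRange_one, evaluate_expression, hb0, hmod, hr, hr']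
  · rw [pv_flatMap_unique _ (PySem.List.nodup_pyRange_one 10 100)
        (fun c => pvMatch e (pvCandChars a "/" b c) && evaluate_expression a "/" b c)
        (fun c => pvCandChars a "/" b c) 0
        (by intro c h; simp [evaluate_expression, hb0, hmod] at h)]
    simp [pvM1, pvDerC, evaluate_expression, hb0, hmod]

-- swap A's c-loop with the operator dispatch: a permutation
theorem pv_inner_perm (e : String) (a b : Int) (hb : (10 : Int) ≤ b) :
    ((PySem.List.pyRange 10 100 1).flatMap fun c => operators.flatMap (pvGop e a b c)).Perm
      (operators.flatMap (pvM1 e a b)) := by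
  have hops : ((PySem.List.pyRange 10 100 1).flatMap fun c => operators.flatMap (pvGop e a b c))
      = (PySem.List.pyRange 10 100 1).flatMap
          (fun c => pvGop e a b c "+" ++ pvGop e a b c "-" ++ pvGop e a b c "*"
            ++ pvGop e a b c "/") := by
    simp only [pv_ops_flatMap]
  rw [pv_ops_flatMap, ← pv_plus_eq, ← pv_minus_eq, ← pv_mul_eq, ← pv_div_eq e a b hb, hops]
  refine ((List.flatMap_append_perm _ _ _).symm).trans (List.Perm.append_right _ ?_)
  refine ((List.flatMap_append_perm _ _ _).symm).trans (List.Perm.append_right _ ?_)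
  exact (List.flatMap_append_perm _ _ _).symm

theorem pv_lists_perm (e : String) : (pvAList e).Perm (pvMList e) := by
  unfold pvAList pvMList
  apply List.Perm.flatMap_left
  intro a _
  apply List.Perm.flatMap_left
  intro b hb
  exact pv_inner_perm e a b (PySem.List.mem_pyRange_one.mp hb).1

-- ===== stage 2: the intermediate form equals B's pattern-directed search =====

theorem pv_toChars_two (n : Int) (h1 : 10 ≤ n) (h2 : n ≤ 99) :
    PySem.Int.toChars n = [pvDigC (PySem.Int.floordiv n 10), pvDigC (PySem.Int.mod n 10)] := by
  interval_cases n <;> decide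

theorem pv_digit_split (d0 d1 : Int) (_h0 : 1 ≤ d0) (_h0' : d0 < 10)
    (h1 : 0 ≤ d1) (h1' : d1 < 10) :
    PySem.Int.floordiv (10 * d0 + d1) 10 = d0 ∧ PySem.Int.mod (10 * d0 + d1) 10 = d1 := by
  have hf : PySem.Int.floordiv (10 * d0 + d1) 10 = d0 :=
    (PySem.Int.floordiv_eq_iff_of_pos (by norm_num)).mpr (by constructor <;> omega)
  have hm := PySem.Int.floordiv_mul_add_mod (10 * d0 + d1) 10
  rw [hf] at hm
  exact ⟨hf, by omega⟩

theorem pv_range_join : PySem.List.pyRange 10 100 1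
    = (PySem.List.pyRange 1 10 1).flatMap
        (fun d0 => (PySem.List.pyRange 0 10 1).map (fun d1 => 10 * d0 + d1)) := by
  decide

theorem pv_flatMap_filter {α β : Type} (l : List α) (p : α → Bool) (g : α → List β) :
    (l.filter p).flatMap g = l.flatMap (fun x => if p x then g x else []) := by
  induction l with
  | nil => rfl
  | cons x xs ih => by_cases h : p x <;> simp [h, ih]

theorem pv_if_flatMap {α β : Type} (P : Prop) [Decidable P] (l : List α) (g : α → List β) :
    (if P then l.flatMap g else []) = l.flatMap (fun x => if P then g x else []) := by
  by_cases h : P <;> simp [h]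

theorem pv_exists12 (el : List Char) (h : el.length = 12) :
    ∃ c0 c1 c2 c3 c4 c5 c6 c7 c8 c9 c10 c11,
      el = [c0, c1, c2, c3, c4, c5, c6, c7, c8, c9, c10, c11] := by
  rcases el with _ | ⟨c0, el⟩; · simp at h
  rcases el with _ | ⟨c1, el⟩; · simp at h
  rcases el with _ | ⟨c2, el⟩; · simp at h
  rcases el with _ | ⟨c3, el⟩; · simp at h
  rcases el with _ | ⟨c4, el⟩; · simp at h
  rcases el with _ | ⟨c5, el⟩; · simp at h
  rcases el with _ | ⟨c6, el⟩; · simp at h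
  rcases el with _ | ⟨c7, el⟩; · simp at h
  rcases el with _ | ⟨c8, el⟩; · simp at h
  rcases el with _ | ⟨c9, el⟩; · simp at h
  rcases el with _ | ⟨c10, el⟩; · simp at h
  rcases el with _ | ⟨c11, el⟩; · simp at h
  have : el = [] := by
    simp only [List.length_cons] at h
    exact List.length_eq_zero_iff.mp (by omega)
  subst this
  exact ⟨c0, c1, c2, c3, c4, c5, c6, c7, c8, c9, c10, c11, rfl⟩

-- length of every candidate string is 12
theorem pv_cand_len (a b c : Int) (op : String) (hop : op ∈ operators)
    (ha : 10 ≤ a ∧ a ≤ 99) (hb : 10 ≤ b ∧ b ≤ 99) (hc : 10 ≤ c ∧ c ≤ 99) :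
    (pvCandChars a op b c).length = 12 := by
  have hopl : op.toList.length = 1 := by
    fin_cases hop <;> rfl
  simp [pvCandChars, pv_toChars_two a ha.1 ha.2, pv_toChars_two b hb.1 hb.2,
    pv_toChars_two c hc.1 hc.2, hopl]

-- pvMatch against a candidate, characterised position by position
theorem pv_match_eq (e : String) (e0 e1 e2 e3 e4 e5 e6 e7 e8 e9 e10 e11 : Char)
    (hel : e.toList = [e0, e1, e2, e3, e4, e5, e6, e7, e8, e9, e10, e11])
    (a b c : Int) (ha : 10 ≤ a ∧ a ≤ 99) (hb : 10 ≤ b ∧ b ≤ 99) (hc : 10 ≤ c ∧ c ≤ 99)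
    (op : String) (opc : Char) (hop : op.toList = [opc]) :
    pvMatch e (pvCandChars a op b c) =
      (pvChk e0 (pvDigC (PySem.Int.floordiv a 10)) && pvChk e1 (pvDigC (PySem.Int.mod a 10)) &&
       pvChk e2 ' ' && pvChk e3 opc && pvChk e4 ' ' &&
       pvChk e5 (pvDigC (PySem.Int.floordiv b 10)) && pvChk e6 (pvDigC (PySem.Int.mod b 10)) &&
       pvChk e7 ' ' && pvChk e8 '=' && pvChk e9 ' ' &&
       pvChk e10 (pvDigC (PySem.Int.floordiv c 10)) && pvChk e11 (pvDigC (PySem.Int.mod c 10))) := by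
  unfold pvMatch pvCandChars
  rw [hel, hop, pv_toChars_two a ha.1 ha.2, pv_toChars_two b hb.1 hb.2,
    pv_toChars_two c hc.1 hc.2]
  simp [pvMatchChars, pvChk, Bool.and_assoc]

-- B's per-(a, b, op) contribution, with the digit-position guards folded in
def pvBItem (el : List Char) (a b : Int) (op : Char) : List (List Char) :=
  if (pvChk (el.getD 0 ' ') (pvDigC (PySem.Int.floordiv a 10)) &&
      pvChk (el.getD 1 ' ') (pvDigC (PySem.Int.mod a 10)) &&
      pvChk (el.getD 5 ' ') (pvDigC (PySem.Int.floordiv b 10)) &&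
      pvChk (el.getD 6 ' ') (pvDigC (PySem.Int.mod b 10)) &&
      pvChk (el.getD 3 ' ') op) = true
  then pvResults el a op b else []

theorem pv_point_add (e : String) (e0 e1 e2 e3 e4 e5 e6 e7 e8 e9 e10 e11 : Char)
    (hel : e.toList = [e0, e1, e2, e3, e4, e5, e6, e7, e8, e9, e10, e11])
    (hf2 : pvChk e2 ' ' = true) (hf4 : pvChk e4 ' ' = true) (hf7 : pvChk e7 ' ' = true)
    (hf8 : pvChk e8 '=' = true) (hf9 : pvChk e9 ' ' = true)
    (a b : Int) (ha : 10 ≤ a ∧ a ≤ 99) (hb : 10 ≤ b ∧ b ≤ 99) :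
    pvM1 e a b "+" = pvBItem [e0, e1, e2, e3, e4, e5, e6, e7, e8, e9, e10, e11] a b '+' := by
  by_cases hr : (10 : Int) ≤ a + b ∧ a + b ≤ 99
  · have hcand : pvCandChars a "+" b (a + b) = pvCandB a '+' b (a + b) := by
      simp [pvCandChars, pvCandB, pv_toChars_two a ha.1 ha.2, pv_toChars_two b hb.1 hb.2,
        pv_toChars_two (a + b) hr.1 hr.2]
    simp only [pvM1, pvDerC, pvBItem, pvResults, pvResC, reduceIte]
    rw [pv_match_eq e e0 e1 e2 e3 e4 e5 e6 e7 e8 e9 e10 e11 hel a b (a + b) ha hb hr "+" '+' rfl]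
    simp only [List.getD_cons_zero, List.getD_cons_succ, hf2, hf4, hf7, hf8, hf9,
      Bool.and_true, hr, hcand]
    cases h0 : pvChk e0 (pvDigC (PySem.Int.floordiv a 10)) <;>
      cases h1 : pvChk e1 (pvDigC (PySem.Int.mod a 10)) <;>
      cases h3 : pvChk e3 '+' <;>
      cases h5 : pvChk e5 (pvDigC (PySem.Int.floordiv b 10)) <;>
      cases h6 : pvChk e6 (pvDigC (PySem.Int.mod b 10)) <;>
      cases h10 : pvChk e10 (pvDigC (PySem.Int.floordiv (a + b) 10)) <;>
      cases h11 : pvChk e11 (pvDigC (PySem.Int.mod (a + b) 10)) <;>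
      simp_all
  · simp only [pvM1, pvDerC, pvBItem, pvResults, pvResC, reduceIte]
    simp [hr]

theorem pv_point_sub (e : String) (e0 e1 e2 e3 e4 e5 e6 e7 e8 e9 e10 e11 : Char)
    (hel : e.toList = [e0, e1, e2, e3, e4, e5, e6, e7, e8, e9, e10, e11])
    (hf2 : pvChk e2 ' ' = true) (hf4 : pvChk e4 ' ' = true) (hf7 : pvChk e7 ' ' = true)
    (hf8 : pvChk e8 '=' = true) (hf9 : pvChk e9 ' ' = true)
    (a b : Int) (ha : 10 ≤ a ∧ a ≤ 99) (hb : 10 ≤ b ∧ b ≤ 99) :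
    pvM1 e a b "-" = pvBItem [e0, e1, e2, e3, e4, e5, e6, e7, e8, e9, e10, e11] a b '-' := by
  by_cases hr : (10 : Int) ≤ a - b ∧ a - b ≤ 99
  case neg => have hr2 : ¬ ((10 : Int) ≤ a - b ∧ a ≤ 99 + b) := by omega
              simp only [pvM1, pvDerC, pvBItem, pvResults, pvResC, String.reduceEq,
                Char.reduceEq, reduceIte]
              simp [hr2]
  · have hcand : pvCandChars a "-" b (a - b) = pvCandB a '-' b (a - b) := by
      simp [pvCandChars, pvCandB, pv_toChars_two a ha.1 ha.2, pv_toChars_two b hb.1 hb.2,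
        pv_toChars_two (a - b) hr.1 hr.2]
    simp only [pvM1, pvDerC, pvBItem, pvResults, pvResC, String.reduceEq, Char.reduceEq, reduceIte]
    rw [pv_match_eq e e0 e1 e2 e3 e4 e5 e6 e7 e8 e9 e10 e11 hel a b (a - b) ha hb hr "-" '-' rfl]
    simp only [List.getD_cons_zero, List.getD_cons_succ, hf2, hf4, hf7, hf8, hf9,
      Bool.and_true, hr, hcand]
    cases h0 : pvChk e0 (pvDigC (PySem.Int.floordiv a 10)) <;>
      cases h1 : pvChk e1 (pvDigC (PySem.Int.mod a 10)) <;>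
      cases h3 : pvChk e3 '-' <;>
      cases h5 : pvChk e5 (pvDigC (PySem.Int.floordiv b 10)) <;>
      cases h6 : pvChk e6 (pvDigC (PySem.Int.mod b 10)) <;>
      cases h10 : pvChk e10 (pvDigC (PySem.Int.floordiv (a - b) 10)) <;>
      cases h11 : pvChk e11 (pvDigC (PySem.Int.mod (a - b) 10)) <;>
      simp_all

theorem pv_point_mul (e : String) (e0 e1 e2 e3 e4 e5 e6 e7 e8 e9 e10 e11 : Char)
    (hel : e.toList = [e0, e1, e2, e3, e4, e5, e6, e7, e8, e9, e10, e11])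
    (hf2 : pvChk e2 ' ' = true) (hf4 : pvChk e4 ' ' = true) (hf7 : pvChk e7 ' ' = true)
    (hf8 : pvChk e8 '=' = true) (hf9 : pvChk e9 ' ' = true)
    (a b : Int) (ha : 10 ≤ a ∧ a ≤ 99) (hb : 10 ≤ b ∧ b ≤ 99) :
    pvM1 e a b "*" = pvBItem [e0, e1, e2, e3, e4, e5, e6, e7, e8, e9, e10, e11] a b '*' := by
  by_cases hr : (10 : Int) ≤ a * b ∧ a * b ≤ 99
  · have hcand : pvCandChars a "*" b (a * b) = pvCandB a '*' b (a * b) := by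
      simp [pvCandChars, pvCandB, pv_toChars_two a ha.1 ha.2, pv_toChars_two b hb.1 hb.2,
        pv_toChars_two (a * b) hr.1 hr.2]
    simp only [pvM1, pvDerC, pvBItem, pvResults, pvResC, String.reduceEq, Char.reduceEq, reduceIte]
    rw [pv_match_eq e e0 e1 e2 e3 e4 e5 e6 e7 e8 e9 e10 e11 hel a b (a * b) ha hb hr "*" '*' rfl]
    simp only [List.getD_cons_zero, List.getD_cons_succ, hf2, hf4, hf7, hf8, hf9,
      Bool.and_true, hr, hcand]
    cases h0 : pvChk e0 (pvDigC (PySem.Int.floordiv a 10)) <;>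
      cases h1 : pvChk e1 (pvDigC (PySem.Int.mod a 10)) <;>
      cases h3 : pvChk e3 '*' <;>
      cases h5 : pvChk e5 (pvDigC (PySem.Int.floordiv b 10)) <;>
      cases h6 : pvChk e6 (pvDigC (PySem.Int.mod b 10)) <;>
      cases h10 : pvChk e10 (pvDigC (PySem.Int.floordiv (a * b) 10)) <;>
      cases h11 : pvChk e11 (pvDigC (PySem.Int.mod (a * b) 10)) <;>
      simp_all
  · simp only [pvM1, pvDerC, pvBItem, pvResults, pvResC, String.reduceEq, Char.reduceEq, reduceIte]
    simp [hr]

set_option maxHeartbeats 1600000 in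
theorem pv_point_div (e : String) (e0 e1 e2 e3 e4 e5 e6 e7 e8 e9 e10 e11 : Char)
    (hel : e.toList = [e0, e1, e2, e3, e4, e5, e6, e7, e8, e9, e10, e11])
    (hf2 : pvChk e2 ' ' = true) (hf4 : pvChk e4 ' ' = true) (hf7 : pvChk e7 ' ' = true)
    (hf8 : pvChk e8 '=' = true) (hf9 : pvChk e9 ' ' = true)
    (a b : Int) (ha : 10 ≤ a ∧ a ≤ 99) (hb : 10 ≤ b ∧ b ≤ 99) :
    pvM1 e a b "/" = pvBItem [e0, e1, e2, e3, e4, e5, e6, e7, e8, e9, e10, e11] a b '/' := by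
  by_cases hmod : PySem.Int.mod a b = 0
  · by_cases hr : (10 : Int) ≤ PySem.Int.floordiv a b ∧ PySem.Int.floordiv a b ≤ 99
    · have hcand : pvCandChars a "/" b (PySem.Int.floordiv a b)
          = pvCandB a '/' b (PySem.Int.floordiv a b) := by
        simp [pvCandChars, pvCandB, pv_toChars_two a ha.1 ha.2, pv_toChars_two b hb.1 hb.2,
          pv_toChars_two (PySem.Int.floordiv a b) hr.1 hr.2]
      simp only [pvM1, pvDerC, pvBItem, pvResults, pvResC, String.reduceEq, Char.reduceEq,
        reduceIte, hmod, ne_eq, not_true_eq_false]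
      rw [pv_match_eq e e0 e1 e2 e3 e4 e5 e6 e7 e8 e9 e10 e11 hel a b
        (PySem.Int.floordiv a b) ha hb hr "/" '/' rfl]
      simp only [List.getD_cons_zero, List.getD_cons_succ, hf2, hf4, hf7, hf8, hf9,
        Bool.and_true, hr, hcand]
      cases h0 : pvChk e0 (pvDigC (PySem.Int.floordiv a 10)) <;>
        cases h1 : pvChk e1 (pvDigC (PySem.Int.mod a 10)) <;>
        cases h3 : pvChk e3 '/' <;>
        cases h5 : pvChk e5 (pvDigC (PySem.Int.floordiv b 10)) <;>
        cases h6 : pvChk e6 (pvDigC (PySem.Int.mod b 10)) <;>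
        cases h10 : pvChk e10 (pvDigC (PySem.Int.floordiv (PySem.Int.floordiv a b) 10)) <;>
        cases h11 : pvChk e11 (pvDigC (PySem.Int.mod (PySem.Int.floordiv a b) 10)) <;>
        simp_all
    · simp only [pvM1, pvDerC, pvBItem, pvResults, pvResC, String.reduceEq, Char.reduceEq,
        reduceIte, hmod, ne_eq, not_true_eq_false]
      simp [hr]
  · simp only [pvM1, pvDerC, pvBItem, pvResults, pvResC, String.reduceEq, Char.reduceEq,
      reduceIte, hmod, ne_eq, not_false_eq_true]
    split_ifs <;> rfl

-- pvAList is empty when the pattern has the wrong length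
theorem pvAList_nil_of_len (e : String) (hlen : e.toList.length ≠ 12) : pvAList e = [] := by
  unfold pvAList
  simp only [List.flatMap_eq_nil_iff]
  intro a ha b hb c hc op hop
  rw [PySem.List.mem_pyRange_one] at ha hb hc
  have hm : pvMatch e (pvCandChars a op b c) = false := by
    have hc12 : (pvCandChars a op b c).length = 12 :=
      pv_cand_len a b c op hop ((pv_bounds_iff a).mp ha) ((pv_bounds_iff b).mp hb)
        ((pv_bounds_iff c).mp hc)
    have hlen' : e.length ≠ 12 := by rw [← String.length_toList]; exact hlen
    unfold pvMatch
    rw [hc12]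
    simp [hlen']
  simp [pvGop, hm]

theorem pv_point_all (e : String) (e0 e1 e2 e3 e4 e5 e6 e7 e8 e9 e10 e11 : Char)
    (hel : e.toList = [e0, e1, e2, e3, e4, e5, e6, e7, e8, e9, e10, e11])
    (hf2 : pvChk e2 ' ' = true) (hf4 : pvChk e4 ' ' = true) (hf7 : pvChk e7 ' ' = true)
    (hf8 : pvChk e8 '=' = true) (hf9 : pvChk e9 ' ' = true)
    (a b : Int) (ha : 10 ≤ a ∧ a ≤ 99) (hb : 10 ≤ b ∧ b ≤ 99) :
    operators.flatMap (pvM1 e a b)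
      = (['+', '-', '*', '/'] : List Char).flatMap
          (pvBItem [e0, e1, e2, e3, e4, e5, e6, e7, e8, e9, e10, e11] a b) := by
  rw [pv_ops_flatMap]
  simp only [List.flatMap_cons, List.flatMap_nil, List.append_nil]
  rw [pv_point_add e e0 e1 e2 e3 e4 e5 e6 e7 e8 e9 e10 e11 hel hf2 hf4 hf7 hf8 hf9 a b ha hb,
    pv_point_sub e e0 e1 e2 e3 e4 e5 e6 e7 e8 e9 e10 e11 hel hf2 hf4 hf7 hf8 hf9 a b ha hb,
    pv_point_mul e e0 e1 e2 e3 e4 e5 e6 e7 e8 e9 e10 e11 hel hf2 hf4 hf7 hf8 hf9 a b ha hb,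
    pv_point_div e e0 e1 e2 e3 e4 e5 e6 e7 e8 e9 e10 e11 hel hf2 hf4 hf7 hf8 hf9 a b ha hb,
    List.append_assoc, List.append_assoc]

-- split an a in [10, 100) into its two digits
theorem pv_sum_split (G : Int → List (List Char)) :
    (PySem.List.pyRange 10 100 1).flatMap G
      = (PySem.List.pyRange 1 10 1).flatMap fun d0 =>
          (PySem.List.pyRange 0 10 1).flatMap fun d1 => G (10 * d0 + d1) := by
  rw [pv_range_join, List.flatMap_assoc]
  simp only [List.flatMap_map]

-- B's filtered digit search equals the guarded full search
theorem pvB_eq_full (el : List Char) :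
    (((PySem.List.pyRange 1 10 1).filter fun d => pvChk (el.getD 0 ' ') (pvDigC d)).flatMap fun d0 =>
      ((PySem.List.pyRange 0 10 1).filter fun d => pvChk (el.getD 1 ' ') (pvDigC d)).flatMap fun d1 =>
        ((PySem.List.pyRange 1 10 1).filter fun d => pvChk (el.getD 5 ' ') (pvDigC d)).flatMap fun d2 =>
          ((PySem.List.pyRange 0 10 1).filter fun d => pvChk (el.getD 6 ' ') (pvDigC d)).flatMap fun d3 =>
            ((['+', '-', '*', '/'] : List Char).filter fun op => pvChk (el.getD 3 ' ') op).flatMap fun op =>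
              pvResults el (10 * d0 + d1) op (10 * d2 + d3))
    = (PySem.List.pyRange 10 100 1).flatMap fun a =>
        (PySem.List.pyRange 10 100 1).flatMap fun b =>
          (['+', '-', '*', '/'] : List Char).flatMap (pvBItem el a b) := by
  conv_rhs => simp only [pv_sum_split]
  simp only [pv_flatMap_filter, pv_if_flatMap]
  apply List.flatMap_congr; intro d0 hd0
  apply List.flatMap_congr; intro d1 hd1
  apply List.flatMap_congr; intro d2 hd2
  apply List.flatMap_congr; intro d3 hd3
  apply List.flatMap_congr; intro op hop
  rw [PySem.List.mem_pyRange_one] at hd0 hd1 hd2 hd3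
  obtain ⟨hfa, hma⟩ := pv_digit_split d0 d1 hd0.1 hd0.2 hd1.1 hd1.2
  obtain ⟨hfb, hmb⟩ := pv_digit_split d2 d3 hd2.1 hd2.2 hd3.1 hd3.2
  simp only [pvBItem, hfa, hma, hfb, hmb]
  cases h0 : pvChk (el.getD 0 ' ') (pvDigC d0) <;>
    cases h1 : pvChk (el.getD 1 ' ') (pvDigC d1) <;>
    cases h2 : pvChk (el.getD 5 ' ') (pvDigC d2) <;>
    cases h3 : pvChk (el.getD 6 ' ') (pvDigC d3) <;>
    cases h4 : pvChk (el.getD 3 ' ') op <;> simp_all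

-- pvAList is empty when a fixed layout position cannot match
theorem pvAList_nil_of_fix (e : String) (e0 e1 e2 e3 e4 e5 e6 e7 e8 e9 e10 e11 : Char)
    (hel : e.toList = [e0, e1, e2, e3, e4, e5, e6, e7, e8, e9, e10, e11])
    (hfix : ¬ (pvChk e2 ' ' && pvChk e4 ' ' && pvChk e7 ' ' && pvChk e8 '=' && pvChk e9 ' ') = true) :
    pvAList e = [] := by
  unfold pvAList
  simp only [List.flatMap_eq_nil_iff]
  intro a ha b hb c hc op hop
  rw [PySem.List.mem_pyRange_one] at ha hb hc
  have ha' := (pv_bounds_iff a).mp ha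
  have hb' := (pv_bounds_iff b).mp hb
  have hc' := (pv_bounds_iff c).mp hc
  have hmf : ∀ opc : Char, op.toList = [opc] →
      pvMatch e (pvCandChars a op b c) = false := by
    intro opc hopl
    rw [pv_match_eq e e0 e1 e2 e3 e4 e5 e6 e7 e8 e9 e10 e11 hel a b c ha' hb' hc' op opc hopl]
    simp only [Bool.and_eq_true, not_and] at hfix ⊢
    cases hc2 : pvChk e2 ' ' <;> cases hc4 : pvChk e4 ' ' <;> cases hc7 : pvChk e7 ' ' <;>
      cases hc8 : pvChk e8 '=' <;> cases hc9 : pvChk e9 ' ' <;> simp_all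
  have hm : pvMatch e (pvCandChars a op b c) = false := by
    fin_cases hop
    · exact hmf '+' rfl
    · exact hmf '-' rfl
    · exact hmf '*' rfl
    · exact hmf '/' rfl
  simp [pvGop, hm]

-- ===== VERDICT (by name: the statement is the Claim_ definition above) =====
theorem restore_expression_spec : Claim_equal_restore_expression := by
  intro e _
  unfold Spec_restore_expression restore_expression restore_expression_alt
  rw [pvA_fold_eq]
  by_cases hlen : e.toList.length = 12
  case neg =>
    rw [pvAList_nil_of_len e hlen]
    have hlen' : e.length ≠ 12 := by rw [← String.length_toList]; exact hlen
    simp [hlen']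
  case pos =>
    obtain ⟨e0, e1, e2, e3, e4, e5, e6, e7, e8, e9, e10, e11, hel⟩ := pv_exists12 _ hlen
    simp only [hel]
    have hlen12 : ¬ (([e0, e1, e2, e3, e4, e5, e6, e7, e8, e9, e10, e11] : List Char).length ≠ 12) := by
      simp
    rw [if_neg hlen12]
    by_cases hfix : (pvChk e2 ' ' && pvChk e4 ' ' && pvChk e7 ' ' && pvChk e8 '=' && pvChk e9 ' ') = true
    case neg =>
      rw [pvAList_nil_of_fix e e0 e1 e2 e3 e4 e5 e6 e7 e8 e9 e10 e11 hel hfix]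
      have hall : ¬ ((([(2, ' '), (4, ' '), (7, ' '), (8, '='), (9, ' ')] : List (Nat × Char)).all
          (fun p => pvChk (([e0, e1, e2, e3, e4, e5, e6, e7, e8, e9, e10, e11] : List Char).getD p.1 ' ') p.2)) = true) := by
        simp only [List.all_cons, List.all_nil, Bool.and_true, List.getD_cons_zero,
          List.getD_cons_succ, Bool.and_eq_true]
        intro h
        exact hfix (by simp [h.1, h.2.1, h.2.2.1, h.2.2.2])
      rw [if_pos hall]
      rfl
    case pos =>
      simp only [Bool.and_eq_true] at hfix
      obtain ⟨⟨⟨⟨hf2, hf4⟩, hf7⟩, hf8⟩, hf9⟩ := hfix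
      have hall : ¬ ¬ ((([(2, ' '), (4, ' '), (7, ' '), (8, '='), (9, ' ')] : List (Nat × Char)).all
          (fun p => pvChk (([e0, e1, e2, e3, e4, e5, e6, e7, e8, e9, e10, e11] : List Char).getD p.1 ' ') p.2)) = true) := by
        simp only [List.all_cons, List.all_nil, Bool.and_true, List.getD_cons_zero,
          List.getD_cons_succ]
        simp [hf2, hf4, hf7, hf8, hf9]
      rw [if_neg hall]
      have hMid : pvMList e
          = (PySem.List.pyRange 10 100 1).flatMap fun a =>
              (PySem.List.pyRange 10 100 1).flatMap fun b =>
                (['+', '-', '*', '/'] : List Char).flatMap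
                  (pvBItem [e0, e1, e2, e3, e4, e5, e6, e7, e8, e9, e10, e11] a b) := by
        unfold pvMList
        apply List.flatMap_congr; intro a ha
        apply List.flatMap_congr; intro b hb
        rw [PySem.List.mem_pyRange_one] at ha hb
        exact pv_point_all e e0 e1 e2 e3 e4 e5 e6 e7 e8 e9 e10 e11 hel hf2 hf4 hf7 hf8 hf9
          a b ((pv_bounds_iff a).mp ha) ((pv_bounds_iff b).mp hb)
      rw [pvB_eq_full, ← hMid]
      have hperm := pv_lists_perm e
      by_cases h1 : (pvAList e).length = 1
      · obtain ⟨x, hx⟩ := List.length_eq_one_iff.mp h1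
        rw [hx] at hperm
        have hy : pvMList e = [x] := List.perm_singleton.mp hperm.symm
        simp [hx, hy]
      · have h2 : (pvMList e).length ≠ 1 := by rw [← hperm.length_eq]; exact h1
        simp [h1, h2]
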